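-- pv_equiv track=rewrite | github.com/yashsshah/ipl_fantasy_leaderboard_ys | scripts/sync_csvs_to_data_json.py | build_table_prediction_scores
-- ===== SOURCE A (Python) =====
-- def clean(value: str | None) -> str | None:
--     if value is None:
--         return None
--     value = value.strip()
--     return value if value else None
--
-- def score_table_prediction(actual_order: list[str], predicted_order: list[str | None]) -> int:
--     actual_top_four = set(actual_order[:4])
--     exact_points = sum(
--         1
--         for actual_team, predicted_team in zip(actual_order, predicted_order)
--         if predicted_team and actual_team == predicted_team
--     )
--     playoff_points = sum(1 for team in predicted_order[:4] if team in actual_top_four)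
--     return exact_points + playoff_points
--
-- def build_table_prediction_scores(
--     table_predictions_rows: list[dict[str, str]],
--     member_columns: list[str],
--     table_rankings_rows: list[dict[str, str]],
-- ) -> dict[str, int]:
--     prediction_rows = [row for row in table_predictions_rows if clean(row.get("Rank")) != "Total Points"]
--     actual_order = [clean(row.get("IPLTeamName")) for row in table_rankings_rows if clean(row.get("IPLTeamName"))]
--
--     return {
--         member: score_table_prediction(actual_order, [clean(row.get(member)) for row in prediction_rows])
--         for member in member_columns
--     }
-- ===== SOURCE B (Python) =====
-- def clean(value):
--     if value is None:
--         return None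
--     value = value.strip()
--     return value if value else None
--
--
-- def build_table_prediction_scores(table_predictions_rows, member_columns, table_rankings_rows):
--     actual_order = []
--     for row in table_rankings_rows:
--         team = clean(row.get("IPLTeamName"))
--         if team:
--             actual_order.append(team)
--     actual_top_four = set(actual_order[:4])
--
--     scores = {member: 0 for member in member_columns}
--     i = 0
--     for row in table_predictions_rows:
--         if clean(row.get("Rank")) == "Total Points":
--             continue
--         for member in scores:
--             v = clean(row.get(member))
--             if not v:
--                 continue
--             if i < len(actual_order) and actual_order[i] == v:
--                 scores[member] += 1
--             if i < 4 and v in actual_top_four: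
--                 scores[member] += 1
--         i += 1
--     return scores
-- ===== Notes on version B (the rewrite author's own statement) =====
-- stated objective: faster
-- what changed: Instead of building a per-member predicted-order list and calling a scoring helper (which rebuilds the top-four set) for each member, B precomputes actual_order and the top-four set once and makes a single indexed pass over the prediction rows, incrementing a per-member score dict in place.
import Mathlib
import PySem

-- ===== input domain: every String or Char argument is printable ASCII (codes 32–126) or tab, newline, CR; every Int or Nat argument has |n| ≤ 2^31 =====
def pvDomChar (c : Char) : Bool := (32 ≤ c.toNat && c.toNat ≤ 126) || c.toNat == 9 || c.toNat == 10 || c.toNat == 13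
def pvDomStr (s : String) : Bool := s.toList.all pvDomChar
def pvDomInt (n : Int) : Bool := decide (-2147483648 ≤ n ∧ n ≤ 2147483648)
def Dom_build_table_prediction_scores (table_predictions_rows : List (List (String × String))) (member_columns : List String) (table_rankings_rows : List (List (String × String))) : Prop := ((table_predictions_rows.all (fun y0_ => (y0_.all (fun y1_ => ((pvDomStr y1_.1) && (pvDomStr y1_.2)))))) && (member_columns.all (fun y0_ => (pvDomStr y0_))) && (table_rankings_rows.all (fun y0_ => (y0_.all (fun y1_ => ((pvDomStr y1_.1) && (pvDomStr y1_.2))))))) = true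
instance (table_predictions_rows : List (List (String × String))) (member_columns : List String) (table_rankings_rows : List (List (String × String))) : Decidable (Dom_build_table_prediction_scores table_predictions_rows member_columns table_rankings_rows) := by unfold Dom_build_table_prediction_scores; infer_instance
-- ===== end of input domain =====

-- ===== PORT A =====
-- B replaces A's per-member rescan (a predicted-order list and a fresh top-four set per member)
-- with one precomputed actual_order/top-four and a single indexed pass over the prediction rows
-- updating a score dict in place; same return value (objective: faster by a constant factor, measured).

-- clean(value): None stays None; strip; the empty string is falsy -> None
def pvClean (value : Option String) : Option String :=
  match value with
  | none => none
  | some s =>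
    let v := PySem.Str.strip s
    if v = "" then none else some v

-- score_table_prediction: the two 0/1 generator sums are ported as countP, cast to Int
def pvScoreTable (actual_order : List String) (predicted_order : List (Option String)) : Int :=
  let actual_top_four : PySem.Set String := PySem.Set.ofList (PySem.List.slice actual_order none (some 4))
  let exact_points : Int :=
    ((actual_order.zip predicted_order).countP (fun p =>
        match p.2 with
        | some t => p.1 == t          -- 'predicted_team and actual_team == predicted_team'
        | none => false) : Nat)
  let playoff_points : Int :=
    ((PySem.List.slice predicted_order none (some 4)).countP (fun team =>
        match team with
        | some t => actual_top_four.contains t   -- 'team in actual_top_four' (None is never a member)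
        | none => false) : Nat)
  exact_points + playoff_points

def build_table_prediction_scores (table_predictions_rows : List (List (String × String))) (member_columns : List String) (table_rankings_rows : List (List (String × String))) : List (String × Int) :=
  let prediction_rows := table_predictions_rows.filter
    (fun row => !(pvClean (PySem.Dict.get? (PySem.Dict.mk row) "Rank") == some "Total Points"))
  -- [clean(row.get("IPLTeamName")) for row in rows if clean(...)] : the kept elements are the (truthy) strings
  let actual_order : List String := table_rankings_rows.filterMap
    (fun row => pvClean (PySem.Dict.get? (PySem.Dict.mk row) "IPLTeamName"))
  (member_columns.foldl
    (fun (d : PySem.Dict String Int) member =>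
      d.insert member (pvScoreTable actual_order
        (prediction_rows.map (fun row => pvClean (PySem.Dict.get? (PySem.Dict.mk row) member)))))
    PySem.Dict.empty).items

-- ===== PORT B =====
-- body of B's inner 'for member in scores' loop: v = clean(row.get(member)); two guarded increments
def pvRowStep (actual_order : List String) (actual_top_four : PySem.Set String) (i : Nat)
    (row : List (String × String)) (d : PySem.Dict String Int) (member : String) : PySem.Dict String Int :=
  match pvClean (PySem.Dict.get? (PySem.Dict.mk row) member) with
  | none => d
  | some v =>
    -- 'i < len(actual_order) and actual_order[i] == v' is exactly 'actual_order[i]? == some v'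
    let d1 := if actual_order[i]? == some v then d.modify member 0 (· + 1) else d
    if decide (i < 4) && actual_top_four.contains v then d1.modify member 0 (· + 1) else d1

def build_table_prediction_scores_alt (table_predictions_rows : List (List (String × String))) (member_columns : List String) (table_rankings_rows : List (List (String × String))) : List (String × Int) :=
  let actual_order : List String := table_rankings_rows.foldl
    (fun acc row =>
      match pvClean (PySem.Dict.get? (PySem.Dict.mk row) "IPLTeamName") with
      | some team => acc ++ [team]
      | none => acc) []
  let actual_top_four : PySem.Set String := PySem.Set.ofList (PySem.List.slice actual_order none (some 4))
  let scores0 : PySem.Dict String Int :=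
    member_columns.foldl (fun d member => d.insert member 0) PySem.Dict.empty
  ((table_predictions_rows.foldl
      (fun (st : PySem.Dict String Int × Nat) row =>
        if pvClean (PySem.Dict.get? (PySem.Dict.mk row) "Rank") == some "Total Points" then st
        else ((PySem.Dict.keys st.1).foldl (pvRowStep actual_order actual_top_four st.2 row) st.1, st.2 + 1))
      (scores0, 0)).1).items

-- ===== PRECONDITION & SPEC =====
def Spec_build_table_prediction_scores (table_predictions_rows : List (List (String × String))) (member_columns : List String) (table_rankings_rows : List (List (String × String))) (out : List (String × Int)) : Prop := out = build_table_prediction_scores_alt table_predictions_rows member_columns table_rankings_rows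
instance (table_predictions_rows : List (List (String × String))) (member_columns : List String) (table_rankings_rows : List (List (String × String))) (out : List (String × Int)) : Decidable (Spec_build_table_prediction_scores table_predictions_rows member_columns table_rankings_rows out) := by unfold Spec_build_table_prediction_scores; infer_instance

-- ===== CLAIM (what is proved, stated in full; the proofs are below) =====
def Claim_equal_build_table_prediction_scores : Prop := ∀ (table_predictions_rows : List (List (String × String))) (member_columns : List String) (table_rankings_rows : List (List (String × String))), Dom_build_table_prediction_scores table_predictions_rows member_columns table_rankings_rows → Spec_build_table_prediction_scores table_predictions_rows member_columns table_rankings_rows (build_table_prediction_scores table_predictions_rows member_columns table_rankings_rows)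

-- ===== LEMMAS AND PROOFS =====

-- per-row, per-member increment of B, as a value
def pvInc (actual_order : List String) (top4 : PySem.Set String) (i : Nat) (p : Option String) : Int :=
  match p with
  | none => 0
  | some v => (if actual_order[i]? == some v then 1 else 0)
            + (if decide (i < 4) && top4.contains v then 1 else 0)

-- total increment a member receives from a list of cleaned predictions starting at row index i
def pvContrib (actual_order : List String) (top4 : PySem.Set String) : List (Option String) → Nat → Int
  | [], _ => 0
  | p :: ps, i => pvInc actual_order top4 i p + pvContrib actual_order top4 ps (i + 1)

lemma pv_step_getD_self (a : List String) (t4 : PySem.Set String) (i : Nat)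
    (row : List (String × String)) (d : PySem.Dict String Int) (m : String) :
    (pvRowStep a t4 i row d m).getD m 0
      = d.getD m 0 + pvInc a t4 i (pvClean (PySem.Dict.get? (PySem.Dict.mk row) m)) := by
  unfold pvRowStep pvInc
  cases pvClean (PySem.Dict.get? (PySem.Dict.mk row) m) with
  | none => simp
  | some v =>
    dsimp only
    split_ifs with h1 h2 h2 <;>
      simp [PySem.Dict.getD_modify_self]; ring

lemma pv_step_getD_of_ne (a : List String) (t4 : PySem.Set String) (i : Nat)
    (row : List (String × String)) (d : PySem.Dict String Int) {m m' : String} (h : m' ≠ m) :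
    (pvRowStep a t4 i row d m).getD m' 0 = d.getD m' 0 := by
  unfold pvRowStep
  cases pvClean (PySem.Dict.get? (PySem.Dict.mk row) m) with
  | none => rfl
  | some v =>
    dsimp only
    split_ifs <;> simp [PySem.Dict.getD_modify_of_ne _ _ _ h]

lemma pv_step_keys (a : List String) (t4 : PySem.Set String) (i : Nat)
    (row : List (String × String)) (d : PySem.Dict String Int) (m : String)
    (hm : d.contains m = true) :
    (pvRowStep a t4 i row d m).keys = d.keys := by
  unfold pvRowStep
  cases pvClean (PySem.Dict.get? (PySem.Dict.mk row) m) with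
  | none => rfl
  | some v =>
    dsimp only
    split_ifs <;>
      simp [PySem.Dict.keys_modify, PySem.Dict.keys_insert_of_contains, hm,
        PySem.Dict.contains_modify]

-- the inner 'for member in scores' fold, over a duplicate-free key list K ⊆ keys d
lemma pv_inner_fold (a : List String) (t4 : PySem.Set String) (i : Nat)
    (row : List (String × String)) :
    ∀ (K : List String) (d : PySem.Dict String Int), K.Nodup →
      (∀ k ∈ K, d.contains k = true) →
      (K.foldl (pvRowStep a t4 i row) d).keys = d.keys ∧
      ∀ m, (K.foldl (pvRowStep a t4 i row) d).getD m 0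
          = d.getD m 0 + (if m ∈ K then pvInc a t4 i (pvClean (PySem.Dict.get? (PySem.Dict.mk row) m)) else 0)
  | [], d, _, _ => by simp
  | k :: K, d, hnd, hsub => by
    have hk : d.contains k = true := hsub k (by simp)
    have hnd' : K.Nodup := (List.nodup_cons.mp hnd).2
    have hknotin : k ∉ K := (List.nodup_cons.mp hnd).1
    have hkeys_step : (pvRowStep a t4 i row d k).keys = d.keys := pv_step_keys a t4 i row d k hk
    have hsub' : ∀ j ∈ K, (pvRowStep a t4 i row d k).contains j = true := by
      intro j hj
      have hj' := hsub j (by simp [hj])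
      rw [PySem.Dict.contains_iff_mem_keys] at hj' ⊢
      rw [hkeys_step]; exact hj'
    obtain ⟨ih_keys, ih_getD⟩ := pv_inner_fold a t4 i row K (pvRowStep a t4 i row d k) hnd' hsub'
    constructor
    · simpa [List.foldl_cons, ih_keys] using hkeys_step
    · intro m
      rw [List.foldl_cons, ih_getD m]
      by_cases hmk : m = k
      · subst hmk
        simp [hknotin, pv_step_getD_self a t4 i row d m]
      · rw [pv_step_getD_of_ne a t4 i row d hmk]
        simp [hmk]

-- the outer indexed pass of B over the prediction rows
lemma pv_outer_fold (a : List String) (t4 : PySem.Set String) :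
    ∀ (tpr : List (List (String × String))) (d : PySem.Dict String Int) (i : Nat), d.keys.Nodup →
      ((tpr.foldl
          (fun (st : PySem.Dict String Int × Nat) row =>
            if pvClean (PySem.Dict.get? (PySem.Dict.mk row) "Rank") == some "Total Points" then st
            else ((PySem.Dict.keys st.1).foldl (pvRowStep a t4 st.2 row) st.1, st.2 + 1))
          (d, i)).1.keys = d.keys) ∧
      ∀ m, m ∈ d.keys →
        ((tpr.foldl
            (fun (st : PySem.Dict String Int × Nat) row =>
              if pvClean (PySem.Dict.get? (PySem.Dict.mk row) "Rank") == some "Total Points" then st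
              else ((PySem.Dict.keys st.1).foldl (pvRowStep a t4 st.2 row) st.1, st.2 + 1))
            (d, i)).1.getD m 0
          = d.getD m 0 + pvContrib a t4
              (((tpr.filter (fun row => !(pvClean (PySem.Dict.get? (PySem.Dict.mk row) "Rank") == some "Total Points"))).map
                (fun row => pvClean (PySem.Dict.get? (PySem.Dict.mk row) m)))) i)
  | [], d, i, _ => by simp [pvContrib]
  | row :: tpr, d, i, hnd => by
    by_cases hskip : (pvClean (PySem.Dict.get? (PySem.Dict.mk row) "Rank") == some "Total Points") = true
    · obtain ⟨ih_keys, ih_getD⟩ := pv_outer_fold a t4 tpr d i hnd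
      constructor
      · rw [List.foldl_cons, if_pos hskip]; exact ih_keys
      · intro m hm
        rw [List.foldl_cons, if_pos hskip, ih_getD m hm,
          List.filter_cons_of_neg
            (p := fun row => !(pvClean (PySem.Dict.get? (PySem.Dict.mk row) "Rank") == some "Total Points"))
            (by simp [hskip])]
    · have hsub : ∀ k ∈ d.keys, d.contains k = true := by
        intro k hk; rw [PySem.Dict.contains_iff_mem_keys]; exact hk
      obtain ⟨in_keys, in_getD⟩ := pv_inner_fold a t4 i row d.keys d hnd hsub
      have hnd' : ((d.keys.foldl (pvRowStep a t4 i row) d)).keys.Nodup := by rw [in_keys]; exact hnd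
      obtain ⟨ih_keys, ih_getD⟩ := pv_outer_fold a t4 tpr (d.keys.foldl (pvRowStep a t4 i row) d) (i + 1) hnd'
      have hp : (!(pvClean (PySem.Dict.get? (PySem.Dict.mk row) "Rank") == some "Total Points")) = true := by
        simp only [Bool.not_eq_true'] at *
        simp [hskip]
      constructor
      · rw [List.foldl_cons, if_neg hskip, ih_keys, in_keys]
      · intro m hm
        have hm' : m ∈ (d.keys.foldl (pvRowStep a t4 i row) d).keys := by rw [in_keys]; exact hm
        rw [List.foldl_cons, if_neg hskip, ih_getD m hm', in_getD m, if_pos hm,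
          List.filter_cons_of_pos
            (p := fun row => !(pvClean (PySem.Dict.get? (PySem.Dict.mk row) "Rank") == some "Total Points"))
            hp, List.map_cons]
        show _ = d.getD m 0 + (pvInc a t4 i (pvClean (PySem.Dict.get? (PySem.Dict.mk row) m))
          + pvContrib a t4 ((tpr.filter (fun row => !(pvClean (PySem.Dict.get? (PySem.Dict.mk row) "Rank") == some "Total Points"))).map (fun row => pvClean (PySem.Dict.get? (PySem.Dict.mk row) m))) (i + 1))
        ring

-- value of A's dict-comprehension fold (insert of a value not depending on the accumulator)
lemma pv_Afold_getD (g : String → Int) (m : String) :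
    ∀ (mc : List String) (d : PySem.Dict String Int),
      (mc.foldl (fun d member => d.insert member (g member)) d).getD m 0
        = if m ∈ mc then g m else d.getD m 0
  | [], d => by simp
  | x :: xs, d => by
    rw [List.foldl_cons, pv_Afold_getD g m xs]
    by_cases hxs : m ∈ xs
    · simp [hxs]
    · rcases eq_or_ne m x with rfl | hmx
      · simp [hxs, PySem.Dict.getD_insert]
      · simp [hxs, hmx, PySem.Dict.getD_insert, List.mem_cons]

-- keys of such a fold: first occurrences of the member columns, in order
lemma pv_Afold_keys (g : String → Int) (mc : List String) :
    (mc.foldl (fun (d : PySem.Dict String Int) member => d.insert member (g member)) PySem.Dict.empty).keys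
      = PySem.Set.ofList mc := by
  rw [PySem.Dict.keys_foldl_insert]
  simp [PySem.Set.update_nil_left, PySem.Dict.empty]

lemma pv_Afold_nodup (g : String → Int) (mc : List String) :
    (mc.foldl (fun (d : PySem.Dict String Int) member => d.insert member (g member)) PySem.Dict.empty).keys.Nodup := by
  rw [pv_Afold_keys]
  exact PySem.Set.nodup_ofList mc

-- pvContrib from index i = zip-count against the actual order from i + membership count of the first 4-i slots
lemma pv_contrib_eq (a : List String) (t4 : PySem.Set String) :
    ∀ (preds : List (Option String)) (i : Nat),
      pvContrib a t4 preds i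
        = (((a.drop i).zip preds).countP (fun p =>
              match p.2 with
              | some t => p.1 == t
              | none => false) : Nat)
        + (((preds.take (4 - i)).countP (fun team =>
              match team with
              | some t => t4.contains t
              | none => false) : Nat) : Int)
  | [], i => by simp [pvContrib]
  | p :: ps, i => by
    have hrec : pvContrib a t4 (p :: ps) i
        = pvInc a t4 i p + pvContrib a t4 ps (i + 1) := rfl
    rw [hrec, pv_contrib_eq a t4 ps (i + 1)]
    by_cases hil : i < a.length
    · rw [List.drop_eq_getElem_cons hil, List.zip_cons_cons, List.countP_cons]
      have hgi : a[i]? = some a[i] := List.getElem?_eq_getElem hil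
      by_cases hi4 : i < 4
      · have h4 : 4 - i = (4 - (i + 1)) + 1 := by omega
        rw [h4, List.take_succ_cons, List.countP_cons]
        cases p with
        | none => simp [pvInc] <;> push_cast <;> ring
        | some v =>
          simp only [pvInc, hgi, hi4]
          by_cases hv : a[i] == v <;> by_cases hv4 : t4.contains v <;>
            simp [hv, hv4] <;> push_cast <;> ring
      · have h40 : 4 - i = 0 := by omega
        have h41 : 4 - (i + 1) = 0 := by omega
        rw [h40, h41, List.take_zero]
        cases p with
        | none => simp [pvInc] <;> push_cast <;> ring
        | some v =>
          simp only [pvInc, hgi, hi4]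
          by_cases hv : a[i] == v <;> simp [hv, hi4] <;> push_cast <;> ring
    · have hd1 : a.drop i = [] := List.drop_of_length_le (by omega)
      have hd2 : a.drop (i + 1) = [] := List.drop_of_length_le (by omega)
      have hgi : a[i]? = none := by
        rw [List.getElem?_eq_none_iff]; omega
      rw [hd1, hd2]
      by_cases hi4 : i < 4
      · have h4 : 4 - i = (4 - (i + 1)) + 1 := by omega
        rw [h4, List.take_succ_cons, List.countP_cons]
        cases p with
        | none => simp [pvInc]
        | some v =>
          simp only [pvInc, hgi, hi4]
          by_cases hv4 : t4.contains v <;> simp [hv4] <;> push_cast <;> ring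
      · have h40 : 4 - i = 0 := by omega
        have h41 : 4 - (i + 1) = 0 := by omega
        rw [h40, h41, List.take_zero]
        cases p with
        | none => simp [pvInc]
        | some v => simp [pvInc, hgi, hi4]

-- A's helper equals the total contribution starting at row 0
lemma pv_score_eq_contrib (a : List String) (preds : List (Option String)) :
    pvScoreTable a preds
      = pvContrib a (PySem.Set.ofList (PySem.List.slice a none (some 4))) preds 0 := by
  rw [pv_contrib_eq]
  unfold pvScoreTable
  rw [PySem.List.slice_to preds (by norm_num : (0:Int) ≤ 4)]
  simp

-- B's append-loop builds exactly A's filterMap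
lemma pv_actual_eq :
    ∀ (trr : List (List (String × String))) (acc : List String),
      trr.foldl
        (fun acc row =>
          match pvClean (PySem.Dict.get? (PySem.Dict.mk row) "IPLTeamName") with
          | some team => acc ++ [team]
          | none => acc) acc
      = acc ++ trr.filterMap (fun row => pvClean (PySem.Dict.get? (PySem.Dict.mk row) "IPLTeamName"))
  | [], acc => by simp
  | row :: trr, acc => by
    rw [List.foldl_cons]
    cases h : pvClean (PySem.Dict.get? (PySem.Dict.mk row) "IPLTeamName") <;>
      simp [h, pv_actual_eq trr]

-- two dicts with the same duplicate-free key sequence and the same values are the same assoc list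
lemma pv_dict_ext :
    ∀ (l1 l2 : List (String × Int)),
      l1.map Prod.fst = l2.map Prod.fst → (l1.map Prod.fst).Nodup →
      (∀ m ∈ l1.map Prod.fst, (PySem.Dict.mk l1).getD m 0 = (PySem.Dict.mk l2).getD m 0) →
      l1 = l2
  | [], l2, hk, _, _ => by
    have : l2.map Prod.fst = [] := hk.symm
    simpa using (List.map_eq_nil_iff.mp this).symm
  | (k, v) :: t1, l2, hk, hnd, hval => by
    cases l2 with
    | nil => simp at hk
    | cons p2 t2 =>
      obtain ⟨k2, v2⟩ := p2
      simp only [List.map_cons, List.cons.injEq] at hk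
      obtain ⟨hk12, hkt⟩ := hk
      subst hk12
      have hhead : v = v2 := by
        have := hval k (by simp)
        simpa [PySem.Dict.getD, PySem.Dict.get?, List.find?] using this
      subst hhead
      have hnd' : (t1.map Prod.fst).Nodup := (List.nodup_cons.mp hnd).2
      have hknot : k ∉ t1.map Prod.fst := (List.nodup_cons.mp hnd).1
      have htail : t1 = t2 := by
        apply pv_dict_ext t1 t2 hkt hnd'
        intro m hm
        have hkm : (k == m) = false := by
          simp only [beq_eq_false_iff_ne, ne_eq]
          rintro rfl; exact hknot hm
        have := hval m (by simp [hm])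
        simpa [PySem.Dict.getD, PySem.Dict.get?, List.find?, hkm] using this
      rw [htail]

-- ===== VERDICT (by name: the statement is the Claim_ definition above) =====
theorem build_table_prediction_scores_spec : Claim_equal_build_table_prediction_scores := by
  intro tpr mc trr _hdom
  unfold Spec_build_table_prediction_scores
  unfold build_table_prediction_scores build_table_prediction_scores_alt
  dsimp only
  rw [pv_actual_eq trr [], List.nil_append]
  set a : List String := trr.filterMap (fun row => pvClean (PySem.Dict.get? (PySem.Dict.mk row) "IPLTeamName")) with ha
  set t4 : PySem.Set String := PySem.Set.ofList (PySem.List.slice a none (some 4)) with ht4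
  set g : String → Int := fun member => pvScoreTable a
      ((tpr.filter (fun row => !(pvClean (PySem.Dict.get? (PySem.Dict.mk row) "Rank") == some "Total Points"))).map
        (fun row => pvClean (PySem.Dict.get? (PySem.Dict.mk row) member))) with hg
  have hnd0 : (mc.foldl (fun (d : PySem.Dict String Int) member => d.insert member 0) PySem.Dict.empty).keys.Nodup :=
    pv_Afold_nodup (fun _ => 0) mc
  have h0keys : (mc.foldl (fun (d : PySem.Dict String Int) member => d.insert member 0) PySem.Dict.empty).keys
      = PySem.Set.ofList mc := pv_Afold_keys (fun _ => 0) mc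
  obtain ⟨hBkeys, hBgetD⟩ := pv_outer_fold a t4 tpr
    (mc.foldl (fun (d : PySem.Dict String Int) member => d.insert member 0) PySem.Dict.empty) 0 hnd0
  apply pv_dict_ext
  · show (mc.foldl (fun (d : PySem.Dict String Int) member => d.insert member (g member)) PySem.Dict.empty).keys = _
    rw [pv_Afold_keys g mc]
    exact (hBkeys.trans h0keys).symm
  · show (mc.foldl (fun (d : PySem.Dict String Int) member => d.insert member (g member)) PySem.Dict.empty).keys.Nodup
    exact pv_Afold_nodup g mc
  · intro m hm
    have hmc : m ∈ mc := by
      have : m ∈ (mc.foldl (fun (d : PySem.Dict String Int) member => d.insert member (g member)) PySem.Dict.empty).keys := hm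
      rw [pv_Afold_keys g mc] at this
      exact (PySem.Set.mem_ofList mc m).mp this
    have hm0 : m ∈ (mc.foldl (fun (d : PySem.Dict String Int) member => d.insert member 0) PySem.Dict.empty).keys := by
      rw [h0keys]; exact (PySem.Set.mem_ofList mc m).mpr hmc
    show (mc.foldl (fun (d : PySem.Dict String Int) member => d.insert member (g member)) PySem.Dict.empty).getD m 0
      = ((tpr.foldl
          (fun (st : PySem.Dict String Int × Nat) row =>
            if pvClean (PySem.Dict.get? (PySem.Dict.mk row) "Rank") == some "Total Points" then st
            else ((PySem.Dict.keys st.1).foldl (pvRowStep a t4 st.2 row) st.1, st.2 + 1))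
          (mc.foldl (fun (d : PySem.Dict String Int) member => d.insert member 0) PySem.Dict.empty, 0)).1).getD m 0
    rw [hBgetD m hm0, pv_Afold_getD g m mc PySem.Dict.empty, if_pos hmc,
      pv_Afold_getD (fun _ => 0) m mc PySem.Dict.empty, if_pos hmc]
    have hval : g m = pvContrib a t4
        ((tpr.filter (fun row => !(pvClean (PySem.Dict.get? (PySem.Dict.mk row) "Rank") == some "Total Points"))).map
          (fun row => pvClean (PySem.Dict.get? (PySem.Dict.mk row) m))) 0 :=
      pv_score_eq_contrib a _
    rw [hval]
    simp
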